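-- pv_equiv track=rewrite | github.com/ajsb85/papirus-icons | clean_svg.py | serialize_style
-- ===== SOURCE A (Python) =====
-- def serialize_style(d: dict) -> str:
--     # Stable ordering for readability
--     order = [
--         "filter", "opacity",
--         "fill", "fill-opacity",
--         "stroke", "stroke-opacity", "stroke-width",
--         "stroke-linecap", "stroke-linejoin", "stroke-miterlimit",
--         "stroke-dasharray", "stroke-dashoffset",
--     ]
--     keys = [k for k in order if k in d] + [k for k in d.keys() if k not in order]
--     return ";".join(f"{k}:{d[k]}" for k in keys)
-- ===== SOURCE B (Python) =====
-- def serialize_style(d: dict) -> str: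
--     # Bucket sort: one pass over the items drops each "k:v" pair into the bucket
--     # for its priority rank (unknown keys share the last bucket), then one join.
--     order = [
--         "filter", "opacity",
--         "fill", "fill-opacity",
--         "stroke", "stroke-opacity", "stroke-width",
--         "stroke-linecap", "stroke-linejoin", "stroke-miterlimit",
--         "stroke-dasharray", "stroke-dashoffset",
--     ]
--     rank = {k: i for i, k in enumerate(order)}
--     buckets = [[] for _ in range(len(order) + 1)]
--     for k, v in d.items():
--         buckets[rank.get(k, len(order))].append(f"{k}:{v}")
--     return ";".join(p for b in buckets for p in b)
-- ===== Notes on version B (the rewrite author's own statement) =====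
-- stated objective: alternative
-- what changed: Replaces A's two membership-filter passes over the priority list and the dict keys with a bucket sort: one pass over the items drops each formatted 'k:v' pair into the bucket for its priority rank (rank dict lookup, unknown keys share the last bucket), then the buckets are flattened and joined.
import Mathlib
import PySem

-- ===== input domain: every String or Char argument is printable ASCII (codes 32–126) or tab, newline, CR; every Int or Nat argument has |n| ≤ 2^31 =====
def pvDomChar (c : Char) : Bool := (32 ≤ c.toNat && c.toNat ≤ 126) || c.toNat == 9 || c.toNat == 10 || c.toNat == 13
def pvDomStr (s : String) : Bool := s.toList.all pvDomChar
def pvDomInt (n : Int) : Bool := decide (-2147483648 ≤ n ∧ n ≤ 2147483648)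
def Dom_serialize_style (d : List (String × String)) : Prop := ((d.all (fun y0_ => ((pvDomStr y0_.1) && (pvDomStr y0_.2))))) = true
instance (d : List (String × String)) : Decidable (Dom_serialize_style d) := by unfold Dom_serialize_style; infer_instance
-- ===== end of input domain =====

-- B replaces A's two membership-filter passes by a bucket sort: one pass over the items
-- drops each formatted "k:v" pair into the bucket of its priority rank, then one join.

-- the shared `order` literal of both Pythons
def pvOrder : List String :=
  ["filter", "opacity",
   "fill", "fill-opacity",
   "stroke", "stroke-opacity", "stroke-width",
   "stroke-linecap", "stroke-linejoin", "stroke-miterlimit",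
   "stroke-dasharray", "stroke-dashoffset"]

-- ===== PORT A =====
def serialize_style (d : List (String × String)) : String :=
  let dd := PySem.Dict.ofList d
  let keys := (pvOrder.filter (fun k => dd.contains k))
           ++ (dd.keys.filter (fun k => !(pvOrder.contains k)))
  PySem.Str.join ";" (keys.map (fun k => k ++ ":" ++ dd.getD k ""))

-- ===== PORT B =====
-- rank = {k: i for i, k in enumerate(order)}
def pvRank : PySem.Dict String Int :=
  PySem.Dict.ofList ((PySem.List.enumerate pvOrder).map (fun p => (p.2, p.1)))

def serialize_style_alt (d : List (String × String)) : String :=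
  let dd := PySem.Dict.ofList d
  -- buckets = [[] for _ in range(len(order) + 1)]
  let buckets0 : List (List String) := (List.range (pvOrder.length + 1)).map (fun _ => [])
  -- for k, v in d.items(): buckets[rank.get(k, len(order))].append(f"{k}:{v}")
  -- (the bucket index rank.get(k, 12) is a Python int in 0..12, so .toNat is exact here)
  let buckets := dd.items.foldl
    (fun bs kv =>
      bs.modify ((pvRank.getD kv.1 ((pvOrder.length : Int))).toNat)
        (fun b => b ++ [kv.1 ++ ":" ++ kv.2]))
    buckets0
  -- ";".join(p for b in buckets for p in b)
  PySem.Str.join ";" buckets.flatten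

-- ===== PRECONDITION & SPEC =====
def Spec_serialize_style (d : List (String × String)) (out : String) : Prop := out = serialize_style_alt d
instance (d : List (String × String)) (out : String) : Decidable (Spec_serialize_style d out) := by unfold Spec_serialize_style; infer_instance

-- ===== CLAIM (what is proved, stated in full; the proofs are below) =====
def Claim_equal_serialize_style : Prop := ∀ (d : List (String × String)), Dom_serialize_style d → Spec_serialize_style d (serialize_style d)

-- ===== LEMMAS AND PROOFS =====

-- B's bucket index of a key
def pvIdx (k : String) : Nat := (pvRank.getD k ((pvOrder.length : Int))).toNat

lemma pvIdx_of_mem {k : String} (hk : k ∈ pvOrder) : pvIdx k < 12 := by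
  simp only [pvOrder, List.mem_cons, List.not_mem_nil, or_false] at hk
  rcases hk with rfl|rfl|rfl|rfl|rfl|rfl|rfl|rfl|rfl|rfl|rfl|rfl <;> decide

lemma pvIdx_of_not_mem {k : String} (hk : k ∉ pvOrder) : pvIdx k = 12 := by
  unfold pvIdx
  have hkeys : pvRank.keys = pvOrder := by decide
  have hc : pvRank.contains k = false := by
    rw [PySem.Dict.contains_eq_decide_mem_keys, hkeys]
    simpa using hk
  rw [PySem.Dict.getD_of_not_contains _ _ hc]
  rfl

lemma pvIdx_le (k : String) : pvIdx k ≤ 12 := by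
  by_cases h : k ∈ pvOrder
  · exact le_of_lt (pvIdx_of_mem h)
  · exact le_of_eq (pvIdx_of_not_mem h)

-- (if c then [a] else []) ++ r = if c then a :: r else r
lemma ite_singleton_append {α : Type} (c : Prop) [Decidable c] (a : α) (r : List α) :
    (if c then [a] else []) ++ r = if c then a :: r else r := by
  split <;> rfl

-- a nodup list filtered by equality with a is [a] or []
lemma filter_eq_ite_mem (keys : List String) (hnd : keys.Nodup) (a : String) :
    keys.filter (fun k => k == a) = if a ∈ keys then [a] else [] := by
  rw [List.filter_beq, List.Nodup.count hnd]
  split <;> simp_all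

-- the filter by bucket index j (j ≠ 12, a the unique order key of index j)
lemma filter_idx_eq (keys : List String) (hnd : keys.Nodup) (j : Nat) (a : String)
    (ha : pvIdx a = j) (hja : j ≠ 12)
    (hj : ∀ k ∈ pvOrder, pvIdx k = j → k = a) :
    keys.filter (fun k => decide (pvIdx k = j)) = if a ∈ keys then [a] else [] := by
  rw [← filter_eq_ite_mem keys hnd a]
  apply List.filter_congr
  intro k _
  by_cases hk : k ∈ pvOrder
  · rw [Bool.eq_iff_iff]
    simp only [decide_eq_true_eq, beq_iff_eq]
    exact ⟨hj k hk, fun h => by rw [h]; exact ha⟩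
  · have h12 := pvIdx_of_not_mem hk
    have hamem : a ∈ pvOrder := by
      by_contra hna
      have := pvIdx_of_not_mem hna
      omega
    have hka : k ≠ a := fun h => hk (h ▸ hamem)
    rw [h12, show (k == a) = false by simp [hka], decide_eq_false (by omega : ¬(12 = j))]

-- bucket invariant: the fold appends each formatted pair to the bucket of its index
lemma foldl_buckets (p : List (String × String)) (bs : List (List String))
    (hlt : ∀ kv ∈ p, pvIdx kv.1 < bs.length) :
    p.foldl (fun bs kv => bs.modify (pvIdx kv.1) (fun b => b ++ [kv.1 ++ ":" ++ kv.2])) bs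
    = bs.zipIdx.map (fun bj =>
        bj.1 ++ (p.filter (fun kv => decide (pvIdx kv.1 = bj.2))).map (fun kv => kv.1 ++ ":" ++ kv.2)) := by
  induction p generalizing bs with
  | nil => simp
  | cons kv p ih =>
    simp only [List.foldl_cons]
    rw [ih _ (by intro x hx; rw [List.length_modify]; exact hlt x (by simp [hx]))]
    apply List.ext_getElem
    · simp
    · intro j h1 h2
      have hj : j < bs.length := by simpa using h1
      simp only [List.getElem_map, List.getElem_zipIdx, Nat.zero_add, List.getElem_modify]
      by_cases hij : pvIdx kv.1 = j
      · simp [hij]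
      · simp [hij, Ne.symm]

theorem serialize_style_eq (d : List (String × String)) :
    serialize_style d = serialize_style_alt d := by
  unfold serialize_style serialize_style_alt
  simp only []
  set dd := PySem.Dict.ofList d with hdd
  have hnd : dd.keys.Nodup := PySem.Dict.nodup_keys_ofList d
  congr 1
  -- B's flattened buckets are A's ordered keys, formatted
  have hitems : dd.items = dd.keys.map (fun k => (k, dd.getD k "")) :=
    PySem.Dict.items_eq_map_keys dd hnd ""
  have hfold := foldl_buckets dd.items ((List.range (pvOrder.length + 1)).map (fun _ => []))
    (by intro kv _; exact Nat.lt_succ_of_le (pvIdx_le kv.1))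
  rw [show (fun (bs : List (List String)) (kv : String × String) =>
        bs.modify ((pvRank.getD kv.1 ((pvOrder.length : Int))).toNat)
          (fun b => b ++ [kv.1 ++ ":" ++ kv.2]))
      = (fun bs kv => bs.modify (pvIdx kv.1) (fun b => b ++ [kv.1 ++ ":" ++ kv.2])) from rfl,
    hfold]
  -- the initial buckets, zipped with their indices
  have hzip : ((List.range (pvOrder.length + 1)).map (fun _ => ([] : List String))).zipIdx
      = (List.range 13).map (fun j => (([] : List String), j)) := by
    apply List.ext_getElem
    · simp [pvOrder]
    · intro j h1 h2
      simp only [List.getElem_zipIdx, List.getElem_map, List.getElem_range, Nat.zero_add]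
  rw [hzip, List.map_map, ← List.flatMap_def]
  -- per-bucket contents over the item list
  have hkey : ∀ j, (dd.items.filter (fun kv => decide (pvIdx kv.1 = j))).map (fun kv => kv.1 ++ ":" ++ kv.2)
      = (dd.keys.filter (fun k => decide (pvIdx k = j))).map (fun k => k ++ ":" ++ dd.getD k "") := by
    intro j
    rw [hitems, List.filter_map, List.map_map]
    rfl
  simp only [Function.comp_def, List.nil_append, hkey]
  -- split the last bucket off
  rw [show (13 : Nat) = 12 + 1 from rfl, List.range_succ, List.flatMap_append]
  simp only [List.flatMap_cons, List.flatMap_nil, List.append_nil, List.map_append]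
  congr 1
  · -- buckets 0..11 are A's priority-ordered front
    rw [← List.map_flatMap]
    congr 1
    have hr : List.range 12 = [0,1,2,3,4,5,6,7,8,9,10,11] := by decide
    rw [hr]
    simp only [List.flatMap_cons, List.flatMap_nil, List.append_nil]
    rw [filter_idx_eq dd.keys hnd 0 "filter" (by decide) (by decide) (by decide),
        filter_idx_eq dd.keys hnd 1 "opacity" (by decide) (by decide) (by decide),
        filter_idx_eq dd.keys hnd 2 "fill" (by decide) (by decide) (by decide),
        filter_idx_eq dd.keys hnd 3 "fill-opacity" (by decide) (by decide) (by decide),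
        filter_idx_eq dd.keys hnd 4 "stroke" (by decide) (by decide) (by decide),
        filter_idx_eq dd.keys hnd 5 "stroke-opacity" (by decide) (by decide) (by decide),
        filter_idx_eq dd.keys hnd 6 "stroke-width" (by decide) (by decide) (by decide),
        filter_idx_eq dd.keys hnd 7 "stroke-linecap" (by decide) (by decide) (by decide),
        filter_idx_eq dd.keys hnd 8 "stroke-linejoin" (by decide) (by decide) (by decide),
        filter_idx_eq dd.keys hnd 9 "stroke-miterlimit" (by decide) (by decide) (by decide),
        filter_idx_eq dd.keys hnd 10 "stroke-dasharray" (by decide) (by decide) (by decide),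
        filter_idx_eq dd.keys hnd 11 "stroke-dashoffset" (by decide) (by decide) (by decide)]
    simp only [ite_singleton_append]
    simp only [pvOrder, List.filter_cons, List.filter_nil,
      PySem.Dict.contains_eq_decide_mem_keys, decide_eq_true_eq]
  · -- bucket 12 is A's unknown-key tail
    congr 1
    apply List.filter_congr
    intro k _
    by_cases hk : k ∈ pvOrder
    · have := pvIdx_of_mem hk
      simp [hk, List.contains_eq_mem]
      omega
    · simp [pvIdx_of_not_mem hk, hk, List.contains_eq_mem]

-- ===== VERDICT (by name: the statement is the Claim_ definition above) =====
theorem serialize_style_spec : Claim_equal_serialize_style := by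
  intro d _
  unfold Spec_serialize_style
  exact serialize_style_eq d
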